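-- pv_equiv track=rewrite | github.com/mahmoud-abed0/Data-Communication-Assignment-2025 | utils.py | correct_hamming
-- ===== SOURCE A (Python) =====
-- def bin_to_text(bin_str):
--     result = ""
--     for i in range(0, len(bin_str), 8):
--         byte = bin_str[i:i+8]
--         if len(byte) == 8:
--             val = int(byte, 2)
--             if 32 <= val <= 126:
--                 result += chr(val)
--             else:
--                 result += '?'
--     return result
--
-- def correct_hamming(received_data, sent_control):
--     corrected = False
--     fixed_bits = ""
--
--     for i in range(0, len(sent_control), 7):
--         block = sent_control[i:i+7]
--         if len(block) < 7:
--             continue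
--
--         b = list(map(int, block))
--         p1, p2, d1, p3, d2, d3, d4 = b
--
--         c1 = (p1 + d1 + d2 + d4) % 2
--         c2 = (p2 + d1 + d3 + d4) % 2
--         c3 = (p3 + d2 + d3 + d4) % 2
--
--         error_pos = c3 * 4 + c2 * 2 + c1
--
--         if error_pos != 0:
--             b[error_pos - 1] ^= 1
--             corrected = True
--
--         fixed_bits += f"{b[2]}{b[4]}{b[5]}{b[6]}"
--
--     return bin_to_text(fixed_bits), corrected
-- ===== SOURCE B (Python) =====
-- # Table-driven Hamming(7,4) decoder: precompute, once, the corrected data bits and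
-- # corrected-flag for every 7-bit word, then decode by dictionary lookup per block.
--
-- def _hamming_table():
--     table = {}
--     for n in range(128):
--         word = format(n, '07b')
--         b = [1 if ch == '1' else 0 for ch in word]
--         s = 0
--         for p in (1, 2, 4):
--             par = 0
--             for j in range(7):
--                 if (j + 1) & p:
--                     par ^= b[j]
--             if par:
--                 s += p
--         flag = s != 0
--         if flag:
--             b[s - 1] ^= 1
--         table[word] = (''.join(str(b[j]) for j in (2, 4, 5, 6)), flag)
--     return table
--
-- _TABLE = _hamming_table()
--
-- def correct_hamming(received_data, sent_control):
--     corrected = False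
--     parts = []
--     for i in range(0, len(sent_control) - 6, 7):
--         data, flag = _TABLE[sent_control[i:i + 7]]
--         parts.append(data)
--         corrected = corrected or flag
--     bits = ''.join(parts)
--     out = []
--     while len(bits) >= 8:
--         byte, bits = bits[:8], bits[8:]
--         val = int(byte, 2)
--         out.append(chr(val) if 32 <= val <= 126 else '?')
--     return ''.join(out), corrected
-- ===== Notes on version B (the rewrite author's own statement) =====
-- stated objective: alternative
-- what changed: Per-block syndrome arithmetic is replaced by a decode table precomputed once for all 128 7-bit words (dict lookup per block, iterating only over full blocks), and the bit-to-text pass is a chunk-peeling loop over full bytes instead of an index range with slice-length tests.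
-- outside the precondition, e.g. on correct_hamming('', '0020000'): A returns ('', False), B raises KeyError
import Mathlib
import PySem

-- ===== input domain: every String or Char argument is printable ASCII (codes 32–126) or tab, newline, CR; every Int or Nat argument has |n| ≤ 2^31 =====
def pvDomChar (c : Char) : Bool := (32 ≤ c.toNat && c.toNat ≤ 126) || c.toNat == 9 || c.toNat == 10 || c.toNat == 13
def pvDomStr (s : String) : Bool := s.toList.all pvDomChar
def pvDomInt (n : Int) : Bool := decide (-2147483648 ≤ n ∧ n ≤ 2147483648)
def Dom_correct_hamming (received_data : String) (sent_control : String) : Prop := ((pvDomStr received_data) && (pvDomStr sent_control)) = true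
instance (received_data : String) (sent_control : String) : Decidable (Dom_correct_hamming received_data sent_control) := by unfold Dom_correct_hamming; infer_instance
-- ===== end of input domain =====

-- B replaces per-block syndrome arithmetic by a decode table precomputed once for all 128
-- 7-bit words (dict lookup per full block) and converts bits to text by chunk recursion.


-- ===== PORT A =====
-- int(byte, 2): exact where Python returns a value (under Pre_ the bits are all '0'/'1'); .getD 0 totalizes
def pvParse2 (byte : List Char) : Int := (PySem.Int.ofCharsBase? byte 2).getD 0

-- body of the loop of A's helper bin_to_text (chr(val) = Char.ofNat, exact for 32..126)
def pvTstep (binStr : List Char) (result : List Char) (i : Int) : List Char :=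
  let byte := PySem.List.slice binStr (some i) (some (i + 8))
  if byte.length = 8 then
    let val := pvParse2 byte
    if 32 ≤ val ∧ val ≤ 126 then result ++ [Char.ofNat val.toNat] else result ++ ['?']
  else result

-- A's helper bin_to_text, transliterated on List Char
def pvBinToText (binStr : List Char) : List Char :=
  (PySem.List.pyRange 0 (binStr.length : Int) 8).foldl (pvTstep binStr) []

-- the body of A's for-loop; int(ch) ported as code-48 (exact for digit chars; Pre_ gives '0'/'1')
def pvAstep (sc : List Char) (st : Bool × List Char) (i : Int) : Bool × List Char :=
  let block := PySem.List.slice sc (some i) (some (i + 7))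
  if block.length < 7 then st
  else
    match block.map (fun c => ((c.toNat : Int) - 48)) with
    | [p1, p2, d1, p3, d2, d3, d4] =>
      let c1 := PySem.Int.mod (p1 + d1 + d2 + d4) 2
      let c2 := PySem.Int.mod (p2 + d1 + d3 + d4) 2
      let c3 := PySem.Int.mod (p3 + d2 + d3 + d4) 2
      let errorPos := c3 * 4 + c2 * 2 + c1
      let bc :=
        if errorPos ≠ 0 then
          (([p1, p2, d1, p3, d2, d3, d4].set (errorPos - 1).toNat
              (PySem.Int.bxor ([p1, p2, d1, p3, d2, d3, d4].getD (errorPos - 1).toNat 0) 1)), true)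
        else ([p1, p2, d1, p3, d2, d3, d4], st.1)
      (bc.2, st.2 ++ PySem.Int.toChars (bc.1.getD 2 0) ++ PySem.Int.toChars (bc.1.getD 4 0)
        ++ PySem.Int.toChars (bc.1.getD 5 0) ++ PySem.Int.toChars (bc.1.getD 6 0))
    | _ => st  -- unreachable: a slice kept by the length test has exactly 7 elements

def correct_hamming (received_data : String) (sent_control : String) : String × Bool :=
  let sc := sent_control.toList
  let st := (PySem.List.pyRange 0 (sc.length : Int) 7).foldl (pvAstep sc) (false, [])
  (String.ofList (pvBinToText st.2), st.1)

-- ===== PORT B =====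
-- format(n, '07b'): the 7 binary digits of n, most significant first (exact for n < 128)
def pvWord7 (n : Nat) : List Char :=
  (List.range 7).map (fun j => if (n >>> (6 - j)) % 2 = 1 then '1' else '0')

-- body of the table-building loop: generic parity-check decode of one 7-bit word
def pvDecode7 (word : List Char) : List Char × Bool :=
  let b0 : List Int := word.map (fun ch => if ch == '1' then 1 else 0)
  let s : Int := ([1, 2, 4] : List Int).foldl
    (fun s p =>
      let par := (List.range 7).foldl
        (fun par (j : Nat) => if PySem.Int.band ((j : Int) + 1) p ≠ 0 then PySem.Int.bxor par (b0.getD j 0) else par) 0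
      if par ≠ 0 then s + p else s) 0
  let b := if s ≠ 0 then b0.set (s - 1).toNat (PySem.Int.bxor (b0.getD (s - 1).toNat 0) 1) else b0
  ((([2, 4, 5, 6] : List Nat).map (fun j => PySem.Int.toChars (b.getD j 0))).flatten, s != 0)

def pvTable : PySem.Dict (List Char) (List Char × Bool) :=
  (List.range 128).foldl (fun d n => d.insert (pvWord7 n) (pvDecode7 (pvWord7 n))) PySem.Dict.empty

def pvByteChar (byte : List Char) : Char :=
  let val := pvParse2 byte
  if 32 ≤ val ∧ val ≤ 126 then Char.ofNat val.toNat else '?'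

-- B's while-loop: peel off full 8-bit bytes
def pvBitsToText (bits : List Char) : List Char :=
  if h : 8 ≤ bits.length then pvByteChar (bits.take 8) :: pvBitsToText (bits.drop 8)
  else []
termination_by bits.length
decreasing_by simp; omega

-- body of B's block loop (the dict lookup raises KeyError outside Pre_; .getD totalizes)
def pvBstep (sc : List Char) (st : List (List Char) × Bool) (i : Int) : List (List Char) × Bool :=
  let entry := (pvTable.get? (PySem.List.slice sc (some i) (some (i + 7)))).getD ([], false)
  (st.1 ++ [entry.1], st.2 || entry.2)

def correct_hamming_alt (received_data : String) (sent_control : String) : String × Bool :=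
  let sc := sent_control.toList
  let st := (PySem.List.pyRange 0 ((sc.length : Int) - 6) 7).foldl (pvBstep sc) ([], false)
  (String.ofList (pvBitsToText (PySem.Chars.join [] st.1)), st.2)

-- ===== PRECONDITION & SPEC =====
-- Pre_ excludes sent_control whose full 7-char blocks contain a char other than '0'/'1':
-- non-digit chars make A raise ValueError; digit chars 2-9 can still let A return (the corrupt
-- bits land only in a skipped trailing partial byte), but B's decode table has no such block.
def Pre_correct_hamming (received_data : String) (sent_control : String) : Prop :=
  ∀ c ∈ sent_control.toList.take (7 * (sent_control.toList.length / 7)), c = '0' ∨ c = '1'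
instance (received_data : String) (sent_control : String) : Decidable (Pre_correct_hamming received_data sent_control) := by unfold Pre_correct_hamming; exact List.decidableBAll _ _

def pvWitness_correct_hamming : String × String := ("", "0110100")

def Spec_correct_hamming (received_data : String) (sent_control : String) (out : String × Bool) : Prop := out = correct_hamming_alt received_data sent_control
instance (received_data : String) (sent_control : String) (out : String × Bool) : Decidable (Spec_correct_hamming received_data sent_control out) := by unfold Spec_correct_hamming; infer_instance

-- ===== CLAIM (what is proved, stated in full; the proofs are below) =====
def Claim_equal_correct_hamming : Prop := ∀ (received_data : String) (sent_control : String), Dom_correct_hamming received_data sent_control → Pre_correct_hamming received_data sent_control → Spec_correct_hamming received_data sent_control (correct_hamming received_data sent_control)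

-- ===== LEMMAS AND PROOFS =====

-- A's per-block result (data bits, corrected?), mirroring the body of pvAstep on one full block
def pvAblockPair (block : List Char) : List Char × Bool :=
  match block.map (fun c => ((c.toNat : Int) - 48)) with
  | [p1, p2, d1, p3, d2, d3, d4] =>
    let c1 := PySem.Int.mod (p1 + d1 + d2 + d4) 2
    let c2 := PySem.Int.mod (p2 + d1 + d3 + d4) 2
    let c3 := PySem.Int.mod (p3 + d2 + d3 + d4) 2
    let errorPos := c3 * 4 + c2 * 2 + c1
    let b :=
      if errorPos ≠ 0 then
        [p1, p2, d1, p3, d2, d3, d4].set (errorPos - 1).toNat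
          (PySem.Int.bxor ([p1, p2, d1, p3, d2, d3, d4].getD (errorPos - 1).toNat 0) 1)
      else [p1, p2, d1, p3, d2, d3, d4]
    (PySem.Int.toChars (b.getD 2 0) ++ PySem.Int.toChars (b.getD 4 0)
      ++ PySem.Int.toChars (b.getD 5 0) ++ PySem.Int.toChars (b.getD 6 0), decide (errorPos ≠ 0))
  | _ => ([], false)

-- binary value of a bit string
def pvVal (l : List Char) : Nat := l.foldl (fun a c => 2 * a + if c = '1' then 1 else 0) 0

lemma pv_list_len7 {α : Type} (l : List α) (h : l.length = 7) :
    ∃ a b c d e f g, l = [a, b, c, d, e, f, g] := by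
  rcases l with _ | ⟨a, _ | ⟨b, _ | ⟨c, _ | ⟨d, _ | ⟨e, _ | ⟨f, _ | ⟨g, _ | ⟨x, t⟩⟩⟩⟩⟩⟩⟩⟩ <;>
    first
      | exact ⟨a, b, c, d, e, f, g, rfl⟩
      | (simp at h)

lemma pv_word7_complete (l : List Char) (h7 : l.length = 7)
    (hb : ∀ c ∈ l, c = '0' ∨ c = '1') : pvVal l < 128 ∧ l = pvWord7 (pvVal l) := by
  obtain ⟨a, b, c, d, e, f, g, rfl⟩ := pv_list_len7 l h7
  have ha := hb a (by simp); have hb' := hb b (by simp); have hc := hb c (by simp)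
  have hd := hb d (by simp); have he := hb e (by simp); have hf := hb f (by simp)
  have hg := hb g (by simp)
  rcases ha with rfl | rfl <;> rcases hb' with rfl | rfl <;> rcases hc with rfl | rfl <;>
    rcases hd with rfl | rfl <;> rcases he with rfl | rfl <;> rcases hf with rfl | rfl <;>
    rcases hg with rfl | rfl <;> exact ⟨by decide, by decide⟩

set_option maxHeartbeats 2000000 in
set_option maxRecDepth 100000 in
lemma pv_table_enum : ∀ n : Fin 128,
    pvAblockPair (pvWord7 n) = pvDecode7 (pvWord7 n) ∧
    pvTable.get? (pvWord7 n) = some (pvDecode7 (pvWord7 n)) := by decide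

lemma pv_block_ok (blk : List Char) (h7 : blk.length = 7)
    (hb : ∀ c ∈ blk, c = '0' ∨ c = '1') :
    pvAblockPair blk = pvDecode7 blk ∧ pvTable.get? blk = some (pvDecode7 blk) := by
  obtain ⟨hlt, heq⟩ := pv_word7_complete blk h7 hb
  rw [heq]
  exact pv_table_enum ⟨pvVal blk, hlt⟩

lemma pv_block_binary (sc : List Char)
    (hpre : ∀ c ∈ sc.take (7 * (sc.length / 7)), c = '0' ∨ c = '1')
    (k : Nat) (hk : k < sc.length / 7) :
    ∀ c ∈ (sc.drop (7 * k)).take 7, c = '0' ∨ c = '1' := by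
  intro c hc
  apply hpre
  rw [List.mem_iff_getElem] at hc
  obtain ⟨i, hi, hEq⟩ := hc
  have hi7 : i < 7 := by simp at hi; omega
  have hidx : 7 * k + i < sc.length := by
    simp at hi
    omega
  have hN : 7 * k + i < 7 * (sc.length / 7) := by omega
  have h1 : c = sc[7 * k + i]'hidx := by
    rw [← hEq]
    simp [List.getElem_take, List.getElem_drop]
  have h2 : (sc.take (7 * (sc.length / 7)))[7 * k + i]'(by simp; omega) = sc[7 * k + i]'hidx :=
    List.getElem_take
  rw [h1, ← h2]
  exact List.getElem_mem _

-- range-length normalisations (ceiling counts of pyRange)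
lemma pv_M7 (n : Nat) :
    (if (0 : Int) < (n : Int) then (((n : Int) - 0 + 7 - 1) / 7).toNat else 0) = (n + 6) / 7 := by
  split_ifs with h <;> omega

lemma pv_M7b (n : Nat) :
    (if (0 : Int) < (n : Int) - 6 then (((n : Int) - 6 - 0 + 7 - 1) / 7).toNat else 0) = n / 7 := by
  split_ifs with h <;> omega

lemma pv_M8 (n : Nat) :
    (if (0 : Int) < (n : Int) then (((n : Int) - 0 + 8 - 1) / 8).toNat else 0) = (n + 7) / 8 := by
  split_ifs with h <;> omega

lemma pv_slice_block (sc : List Char) (k : Nat) :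
    PySem.List.slice sc (some ((0 : Int) + 7 * (k : Int))) (some ((0 : Int) + 7 * (k : Int) + 7)) =
      (sc.drop (7 * k)).take 7 := by
  rw [show (0 : Int) + 7 * (k : Int) = ((7 * k : Nat) : Int) by push_cast; ring,
      show ((7 * k : Nat) : Int) + 7 = ((7 * k + 7 : Nat) : Int) by push_cast; ring,
      PySem.List.slice_natCast]
  congr 1
  omega

lemma pv_slice_byte (bs : List Char) (k : Nat) :
    PySem.List.slice bs (some ((0 : Int) + 8 * (k : Int))) (some ((0 : Int) + 8 * (k : Int) + 8)) =
      (bs.drop (8 * k)).take 8 := by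
  rw [show (0 : Int) + 8 * (k : Int) = ((8 * k : Nat) : Int) by push_cast; ring,
      show ((8 * k : Nat) : Int) + 8 = ((8 * k + 8 : Nat) : Int) by push_cast; ring,
      PySem.List.slice_natCast]
  congr 1
  omega

lemma pv_Astep_full (sc : List Char) (st : Bool × List Char) (k : Nat)
    (h : 7 * (k + 1) ≤ sc.length) :
    pvAstep sc st ((0 : Int) + 7 * (k : Int)) =
      (st.1 || (pvAblockPair ((sc.drop (7 * k)).take 7)).2,
       st.2 ++ (pvAblockPair ((sc.drop (7 * k)).take 7)).1) := by
  have hlen : ((sc.drop (7 * k)).take 7).length = 7 := by simp; omega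
  obtain ⟨a, b, c, d, e, f, g, hbk⟩ := pv_list_len7 _ hlen
  unfold pvAstep
  rw [pv_slice_block, hbk]
  simp only [pvAblockPair, List.map_cons, List.map_nil, List.length_cons, List.length_nil]
  norm_num
  split_ifs with hE <;> simp [hE]

lemma pv_Astep_partial (sc : List Char) (st : Bool × List Char) (k : Nat)
    (h2 : sc.length < 7 * (k + 1)) :
    pvAstep sc st ((0 : Int) + 7 * (k : Int)) = st := by
  have hl : ((sc.drop (7 * k)).take 7).length < 7 := by simp; omega
  simp only [pvAstep]
  rw [pv_slice_block, if_pos hl]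

lemma pv_Bstep_full (sc : List Char) (st : List (List Char) × Bool) (k : Nat)
    (h : 7 * (k + 1) ≤ sc.length)
    (hbin : ∀ c ∈ (sc.drop (7 * k)).take 7, c = '0' ∨ c = '1') :
    pvBstep sc st ((0 : Int) + 7 * (k : Int)) =
      (st.1 ++ [(pvDecode7 ((sc.drop (7 * k)).take 7)).1],
       st.2 || (pvDecode7 ((sc.drop (7 * k)).take 7)).2) := by
  have h7 : ((sc.drop (7 * k)).take 7).length = 7 := by simp; omega
  unfold pvBstep
  rw [pv_slice_block, (pv_block_ok _ h7 hbin).2]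
  simp

lemma pv_A_range (sc : List Char)
    (hpre : ∀ c ∈ sc.take (7 * (sc.length / 7)), c = '0' ∨ c = '1') :
    ∀ m, m ≤ sc.length / 7 →
      (List.range m).foldl (fun st (k : Nat) => pvAstep sc st ((0 : Int) + 7 * (k : Int))) (false, []) =
        ((List.range m).any (fun k => (pvDecode7 ((sc.drop (7 * k)).take 7)).2),
         ((List.range m).map (fun k => (pvDecode7 ((sc.drop (7 * k)).take 7)).1)).flatten) := by
  intro m
  induction m with
  | zero => intro _; simp
  | succ m ih =>
    intro hm
    have hfull : 7 * (m + 1) ≤ sc.length := by omega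
    have hbin := pv_block_binary sc hpre m (by omega)
    have h7 : ((sc.drop (7 * m)).take 7).length = 7 := by simp; omega
    obtain ⟨hA, _⟩ := pv_block_ok _ h7 hbin
    rw [List.range_succ, List.foldl_append, ih (by omega)]
    simp only [List.foldl_cons, List.foldl_nil]
    rw [pv_Astep_full sc _ m hfull, hA]
    simp

lemma pv_B_range (sc : List Char)
    (hpre : ∀ c ∈ sc.take (7 * (sc.length / 7)), c = '0' ∨ c = '1') :
    ∀ m, m ≤ sc.length / 7 →
      (List.range m).foldl (fun st (k : Nat) => pvBstep sc st ((0 : Int) + 7 * (k : Int))) ([], false) =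
        ((List.range m).map (fun k => (pvDecode7 ((sc.drop (7 * k)).take 7)).1),
         (List.range m).any (fun k => (pvDecode7 ((sc.drop (7 * k)).take 7)).2)) := by
  intro m
  induction m with
  | zero => intro _; simp
  | succ m ih =>
    intro hm
    have hfull : 7 * (m + 1) ≤ sc.length := by omega
    have hbin := pv_block_binary sc hpre m (by omega)
    rw [List.range_succ, List.foldl_append, ih (by omega)]
    simp only [List.foldl_cons, List.foldl_nil]
    rw [pv_Bstep_full sc _ m hfull hbin]
    simp

lemma pv_A_loop (sc : List Char)
    (hpre : ∀ c ∈ sc.take (7 * (sc.length / 7)), c = '0' ∨ c = '1') :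
    (PySem.List.pyRange 0 (sc.length : Int) 7).foldl (pvAstep sc) (false, []) =
      ((List.range (sc.length / 7)).any (fun k => (pvDecode7 ((sc.drop (7 * k)).take 7)).2),
       ((List.range (sc.length / 7)).map (fun k => (pvDecode7 ((sc.drop (7 * k)).take 7)).1)).flatten) := by
  rw [PySem.List.pyRange_of_pos 0 (sc.length : Int) (by norm_num), List.foldl_map, pv_M7 sc.length]
  by_cases hdvd : sc.length % 7 = 0
  · rw [show (sc.length + 6) / 7 = sc.length / 7 by omega]
    exact pv_A_range sc hpre _ le_rfl
  · rw [show (sc.length + 6) / 7 = sc.length / 7 + 1 by omega, List.range_succ, List.foldl_append,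
        pv_A_range sc hpre _ le_rfl]
    simp only [List.foldl_cons, List.foldl_nil]
    exact pv_Astep_partial sc _ _ (by omega)

lemma pv_B_loop (sc : List Char)
    (hpre : ∀ c ∈ sc.take (7 * (sc.length / 7)), c = '0' ∨ c = '1') :
    (PySem.List.pyRange 0 ((sc.length : Int) - 6) 7).foldl (pvBstep sc) ([], false) =
      ((List.range (sc.length / 7)).map (fun k => (pvDecode7 ((sc.drop (7 * k)).take 7)).1),
       (List.range (sc.length / 7)).any (fun k => (pvDecode7 ((sc.drop (7 * k)).take 7)).2)) := by
  rw [PySem.List.pyRange_of_pos 0 ((sc.length : Int) - 6) (by norm_num), List.foldl_map,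
      pv_M7b sc.length]
  exact pv_B_range sc hpre _ le_rfl

lemma pv_Tstep_full (bs : List Char) (r : List Char) (k : Nat) (h : 8 * (k + 1) ≤ bs.length) :
    pvTstep bs r ((0 : Int) + 8 * (k : Int)) = r ++ [pvByteChar ((bs.drop (8 * k)).take 8)] := by
  have hl : ((bs.drop (8 * k)).take 8).length = 8 := by simp; omega
  unfold pvTstep pvByteChar
  rw [pv_slice_byte]
  simp only [hl]
  split_ifs <;> simp

lemma pv_Tstep_partial (bs : List Char) (r : List Char) (k : Nat) (h2 : bs.length < 8 * (k + 1)) :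
    pvTstep bs r ((0 : Int) + 8 * (k : Int)) = r := by
  have hl : ¬ ((bs.drop (8 * k)).take 8).length = 8 := by simp; omega
  simp only [pvTstep]
  rw [pv_slice_byte, if_neg hl]

lemma pv_T_range (bs : List Char) :
    ∀ m, 8 * m ≤ bs.length →
      (List.range m).foldl (fun r (k : Nat) => pvTstep bs r ((0 : Int) + 8 * (k : Int))) [] =
        (List.range m).map (fun k => pvByteChar ((bs.drop (8 * k)).take 8)) := by
  intro m
  induction m with
  | zero => intro _; simp
  | succ m ih =>
    intro hm
    rw [List.range_succ, List.foldl_append, ih (by omega)]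
    simp only [List.foldl_cons, List.foldl_nil]
    rw [pv_Tstep_full bs _ m (by omega)]
    simp

lemma pv_binToText_map (bs : List Char) :
    pvBinToText bs = (List.range (bs.length / 8)).map (fun k => pvByteChar ((bs.drop (8 * k)).take 8)) := by
  unfold pvBinToText
  rw [PySem.List.pyRange_of_pos 0 (bs.length : Int) (by norm_num), List.foldl_map, pv_M8 bs.length]
  by_cases hdvd : bs.length % 8 = 0
  · rw [show (bs.length + 7) / 8 = bs.length / 8 by omega]
    exact pv_T_range bs (bs.length / 8) (by omega)
  · rw [show (bs.length + 7) / 8 = bs.length / 8 + 1 by omega, List.range_succ, List.foldl_append,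
        pv_T_range bs (bs.length / 8) (by omega)]
    simp only [List.foldl_cons, List.foldl_nil]
    exact pv_Tstep_partial bs _ _ (by omega)

lemma pv_bitsToText_map (bs : List Char) :
    pvBitsToText bs = (List.range (bs.length / 8)).map (fun k => pvByteChar ((bs.drop (8 * k)).take 8)) := by
  induction bs using pvBitsToText.induct with
  | case1 bs h ih =>
    rw [pvBitsToText, dif_pos h, ih]
    rw [show bs.length / 8 = (bs.drop 8).length / 8 + 1 by simp; omega, List.range_succ_eq_map,
        List.map_cons, List.map_map]
    congr 1
    apply List.map_congr_left
    intro a ha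
    simp only [Function.comp_apply, List.drop_drop]
    rw [show (8 : Nat) + 8 * a = 8 * (a + 1) by ring]
  | case2 bs h =>
    rw [pvBitsToText, dif_neg h]
    rw [show bs.length / 8 = 0 by omega]
    simp

lemma pv_text_eq (bs : List Char) : pvBinToText bs = pvBitsToText bs := by
  rw [pv_binToText_map, pv_bitsToText_map]

lemma pv_join_nil (parts : List (List Char)) : PySem.Chars.join [] parts = parts.flatten := by
  induction parts with
  | nil => simp [PySem.Chars.join, List.intercalate]
  | cons x r ih =>
    cases r with
    | nil => simp [PySem.Chars.join, List.intercalate]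
    | cons y t =>
      rw [PySem.Chars.join_cons_cons, ih]
      simp

-- ===== VERDICT (by name: the statement is the Claim_ definition above) =====
theorem correct_hamming_spec : Claim_equal_correct_hamming := by
  intro r s _ hpre
  simp only [Spec_correct_hamming, correct_hamming, correct_hamming_alt]
  have hpre' : ∀ c ∈ s.toList.take (7 * (s.toList.length / 7)), c = '0' ∨ c = '1' := hpre
  rw [pv_A_loop s.toList hpre', pv_B_loop s.toList hpre']
  rw [pv_join_nil, pv_text_eq]
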